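-- pv_equiv track=rewrite | github.com/TecSachinGupta/py-genai-space | src/utilities/document_processors/pdf_processor.py | _classify_figure_type
-- ===== SOURCE A (Python) =====
-- from typing import Dict, List, Any, Tuple
--
-- def _classify_figure_type(drawing: Dict) -> str:
--     """Classify figure type based on drawing properties"""
--     # Simple classification logic - can be enhanced
--     if 'items' in drawing:
--         items = drawing['items']
--         if any('curve' in str(item).lower() for item in items):
--             return 'chart'
--         elif any('rect' in str(item).lower() for item in items):
--             return 'diagram'
--     return 'figure'
-- ===== SOURCE B (Python) =====
-- def _classify_figure_type(drawing):
--     """Classify figure type based on drawing properties"""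
--     if 'items' in drawing:
--         has_rect = False
--         for item in drawing['items']:
--             s = str(item).lower()
--             if 'curve' in s:
--                 return 'chart'
--             if 'rect' in s:
--                 has_rect = True
--         if has_rect:
--             return 'diagram'
--     return 'figure'
-- ===== Notes on version B (the rewrite author's own statement) =====
-- stated objective: alternative
-- what changed: Replaced the two sequential any(...) scans over items (lowercasing each item twice) by a single pass that lowercases each item once, returns 'chart' early on 'curve', and accumulates a has_rect flag decided after the loop.
import Mathlib
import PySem

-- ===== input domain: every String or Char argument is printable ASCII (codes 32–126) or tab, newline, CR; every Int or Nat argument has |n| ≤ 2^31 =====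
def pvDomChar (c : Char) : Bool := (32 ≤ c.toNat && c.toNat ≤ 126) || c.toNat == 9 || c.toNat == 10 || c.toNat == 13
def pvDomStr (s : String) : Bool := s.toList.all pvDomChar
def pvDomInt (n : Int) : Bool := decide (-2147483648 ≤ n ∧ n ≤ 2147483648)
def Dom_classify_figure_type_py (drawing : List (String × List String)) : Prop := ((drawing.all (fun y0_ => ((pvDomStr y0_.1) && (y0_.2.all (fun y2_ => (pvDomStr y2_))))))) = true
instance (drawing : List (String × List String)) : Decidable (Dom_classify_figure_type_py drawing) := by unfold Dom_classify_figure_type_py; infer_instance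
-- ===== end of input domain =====

-- B replaces A's two sequential any-scans by one pass that lowercases each item once,
-- returns 'chart' early on 'curve' and accumulates a has_rect flag (alternative decomposition).


-- ===== PORT A =====
def classify_figure_type_py (drawing : List (String × List String)) : String :=
  match PySem.Dict.get? (PySem.Dict.mk drawing) "items" with
  | some items =>
      if List.any items (fun item => PySem.Str.isIn "curve" (PySem.Str.lower item)) then "chart"
      else if List.any items (fun item => PySem.Str.isIn "rect" (PySem.Str.lower item)) then "diagram"
      else "figure"
  | none => "figure"

-- ===== PORT B =====
-- single pass: early return on 'curve', has_rect flag accumulated, decided after the loop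
def classifyAltLoop (items : List String) (hasRect : Bool) : String :=
  match items with
  | [] => if hasRect then "diagram" else "figure"
  | item :: rest =>
      let s := PySem.Str.lower item
      if PySem.Str.isIn "curve" s then "chart"
      else classifyAltLoop rest (hasRect || PySem.Str.isIn "rect" s)

def classify_figure_type_py_alt (drawing : List (String × List String)) : String :=
  match PySem.Dict.get? (PySem.Dict.mk drawing) "items" with
  | some items => classifyAltLoop items false
  | none => "figure"

-- ===== PRECONDITION & SPEC =====
def Spec_classify_figure_type_py (drawing : List (String × List String)) (out : String) : Prop := out = classify_figure_type_py_alt drawing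
instance (drawing : List (String × List String)) (out : String) : Decidable (Spec_classify_figure_type_py drawing out) := by unfold Spec_classify_figure_type_py; infer_instance

-- ===== CLAIM (what is proved, stated in full; the proofs are below) =====
def Claim_equal_classify_figure_type_py : Prop := ∀ (drawing : List (String × List String)), Dom_classify_figure_type_py drawing → Spec_classify_figure_type_py drawing (classify_figure_type_py drawing)

-- ===== LEMMAS AND PROOFS =====
theorem classifyAltLoop_eq (items : List String) (b : Bool) :
    classifyAltLoop items b =
      if List.any items (fun item => PySem.Str.isIn "curve" (PySem.Str.lower item)) then "chart"
      else if (b || items.any (fun item => PySem.Str.isIn "rect" (PySem.Str.lower item))) then "diagram"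
      else "figure" := by
  induction items generalizing b with
  | nil => simp [classifyAltLoop]
  | cons x rest ih =>
      simp only [classifyAltLoop, List.any_cons]
      by_cases hc : PySem.Str.isIn "curve" (PySem.Str.lower x) = true <;>
        simp [PySem.Str.isIn, PySem.Str.lower] at hc
      · simp [hc]
      · simp [hc, ih, Bool.or_assoc]

-- ===== VERDICT (by name: the statement is the Claim_ definition above) =====
theorem classify_figure_type_py_spec : Claim_equal_classify_figure_type_py := by
  intro drawing _
  unfold Spec_classify_figure_type_py classify_figure_type_py classify_figure_type_py_alt
  cases PySem.Dict.get? (PySem.Dict.mk drawing) "items" with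
  | none => rfl
  | some items => simp [classifyAltLoop_eq]
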